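-- pv_equiv track=rewrite | github.com/hypergraphman/2GruppaEGE24 | task5/other_5.py | f
-- ===== SOURCE A (Python) =====
-- from string import ascii_lowercase, digits
--
-- def n_to_p(n, p):
--     r = ''
--     # alf = '0123456789abcdefghigklmnopqrstuvwxyz'
--     alf = digits + ascii_lowercase
--     while n > 0:
--         r = alf[n % p] + r
--         n //= p
--     return r
--
-- def f(n):
--     s1 = n_to_p(n, 20)
--     s2 = ''
--     for el in s1:
--         if el == '9':
--             s2 += 'a'
--         elif el == 'j':
--             s2 += 'j'
--         else:
--             s2 += chr(ord(el) + 1)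
--     return int(s2, 20)
-- ===== SOURCE B (Python) =====
-- def f(n):
--     res = 0
--     mult = 1
--     while n > 0:
--         d = n % 20
--         res += (d + 1 if d < 19 else 19) * mult
--         mult *= 20
--         n //= 20
--     return res
-- ===== Notes on version B (the rewrite author's own statement) =====
-- stated objective: simpler
-- what changed: B replaces A's build-a-base-20-string / remap-characters / re-parse-with-int(s,20) pipeline by a single arithmetic loop that accumulates each incremented digit (capped at the largest digit) positionally from the digits of n, with no string at all.
-- outside the precondition, e.g. on f(0): A raises ValueError, B returns 0; on f(-5): A raises ValueError, B returns 0
-- crash fix: For n <= 0, A raises ValueError (int('', 20) on the empty digit string); B returns 0. — e.g. on f(0): A raises ValueError, B returns 0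
import Mathlib
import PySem

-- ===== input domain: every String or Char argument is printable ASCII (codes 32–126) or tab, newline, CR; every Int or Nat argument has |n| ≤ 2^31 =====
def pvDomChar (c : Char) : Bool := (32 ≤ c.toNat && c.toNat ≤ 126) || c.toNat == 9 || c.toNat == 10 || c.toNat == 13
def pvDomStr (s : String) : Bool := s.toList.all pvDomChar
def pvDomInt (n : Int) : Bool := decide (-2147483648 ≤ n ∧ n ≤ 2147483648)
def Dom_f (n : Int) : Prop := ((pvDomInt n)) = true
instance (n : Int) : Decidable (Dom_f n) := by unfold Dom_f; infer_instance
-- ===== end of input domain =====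

-- B replaces A's base-20 string building + character remapping + int(s,20) re-parse by one
-- arithmetic loop over the base-20 digits; equivalence is proved for n ≥ 1 (A raises for n ≤ 0).

-- ===== PORT A =====
-- alf = digits + ascii_lowercase
def alfChars : List Char := "0123456789abcdefghijklmnopqrstuvwxyz".toList

-- while n > 0: r = alf[n % p] + r; n //= p   (fuel n.toNat+1 dominates the iteration count,
-- which is at most n.toNat since n strictly decreases under // p on each executed iteration).
-- alf[n % p] would raise IndexError only for an index ≥ 36; for p = 20 the index is always in
-- range 0..19, so the .getD default is never used.
def nToPGo : Nat → Int → Int → List Char → List Char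
  | 0, _, _, r => r
  | fuel + 1, n, p, r =>
    if n > 0 then
      nToPGo fuel (PySem.Int.floordiv n p) p
        (((PySem.List.pyGet? alfChars (PySem.Int.mod n p)).getD ' ') :: r)
    else r

def nToP (n p : Int) : List Char := nToPGo (n.toNat + 1) n p []

def transChar (el : Char) : Char :=
  if el = '9' then 'a' else if el = 'j' then 'j' else Char.ofNat (el.toNat + 1)

-- hand port of int(s, 20) (comment on exactness): the core digit loop val = val*20 + digit,
-- none where int raises ValueError.  Exact for every string f ever parses — the non-empty
-- outputs of the loop above after remapping, which contain no sign, whitespace or underscore —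
-- and for the empty string (int('', 20) raises, = none here).
def int20Go : List Char → Int → Option Int
  | [], acc => some acc
  | c :: r, acc =>
    match PySem.Int.digitVal? c with
    | some d => if d < 20 then int20Go r (acc * 20 + (d : Int)) else none
    | none => none

def int20? (cs : List Char) : Option Int :=
  if cs = [] then none else int20Go cs 0

def f (n : Int) : Int :=
  let s1 := nToP n 20
  let s2 := s1.foldl (fun acc el => acc ++ [transChar el]) ([] : List Char)
  (int20? s2).getD 0

-- ===== PORT B =====
-- while n > 0: d = n % 20; res += (d+1 if d < 19 else 19) * mult; mult *= 20; n //= 20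
def fAltGo : Nat → Int → Int → Int → Int
  | 0, _, _, res => res
  | fuel + 1, n, mult, res =>
    if n > 0 then
      fAltGo fuel (PySem.Int.floordiv n 20) (mult * 20)
        (res + (if PySem.Int.mod n 20 < 19 then PySem.Int.mod n 20 + 1 else 19) * mult)
    else res

def f_alt (n : Int) : Int := fAltGo (n.toNat + 1) n 1 0

-- ===== PRECONDITION & SPEC =====
-- Pre_f excludes exactly the inputs n ≤ 0, on which A raises ValueError (int('', 20)).
def Pre_f (n : Int) : Prop := 1 ≤ n
instance (n : Int) : Decidable (Pre_f n) := by unfold Pre_f; infer_instance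

def pvWitness_f : Int := 7

-- For n ≤ 0, A raises ValueError (int('', 20) on the empty digit string); B returns 0.
def Raises_f (n : Int) : Prop := n ≤ 0
instance (n : Int) : Decidable (Raises_f n) := by unfold Raises_f; infer_instance

def pvRaiseWitness_f : Int := 0
def pvRaiseWitnessOut_f : Int := 0

def Spec_f (n : Int) (out : Int) : Prop := out = f_alt n
instance (n : Int) (out : Int) : Decidable (Spec_f n out) := by unfold Spec_f; infer_instance

-- ===== CLAIM (what is proved, stated in full; the proofs are below) =====
def Claim_equal_f : Prop := ∀ (n : Int), Dom_f n → Pre_f n → Spec_f n (f n)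

def Claim_raises_f : Prop :=
  (∀ (n : Int), Dom_f n → Raises_f n → ¬ Pre_f n) ∧
  (Dom_f (pvRaiseWitness_f) ∧ Raises_f (pvRaiseWitness_f) ∧ f_alt (pvRaiseWitness_f) = pvRaiseWitnessOut_f)

-- ===== LEMMAS AND PROOFS =====

theorem floordiv20_toNat_lt (n : Int) (h : 0 < n) :
    (PySem.Int.floordiv n 20).toNat < n.toNat := by
  rw [PySem.Int.floordiv_eq_ediv_of_pos (by norm_num)]
  omega

-- the digit string A's first loop produces, defined by value recursion
def repA (n : Int) : List Char :=
  if _h : 0 < n then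
    repA (PySem.Int.floordiv n 20) ++ [(PySem.List.pyGet? alfChars (PySem.Int.mod n 20)).getD ' ']
  else []
termination_by n.toNat
decreasing_by exact floordiv20_toNat_lt n _h

-- the value B computes, defined by value recursion
def valB (n : Int) : Int :=
  if h : 0 < n then
    (if PySem.Int.mod n 20 < 19 then PySem.Int.mod n 20 + 1 else 19) + 20 * valB (PySem.Int.floordiv n 20)
  else 0
termination_by n.toNat
decreasing_by exact floordiv20_toNat_lt n h

theorem nToPGo_eq_repA (fuel : Nat) : ∀ (n : Int) (r : List Char), n.toNat ≤ fuel →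
    nToPGo fuel n 20 r = repA n ++ r := by
  induction fuel with
  | zero =>
    intro n r h
    have hn : ¬ 0 < n := by omega
    rw [repA, dif_neg hn]
    rfl
  | succ k ih =>
    intro n r h
    by_cases hn : 0 < n
    · rw [nToPGo, if_pos (by exact hn), ih _ _ (by have := floordiv20_toNat_lt n hn; omega)]
      conv_rhs => rw [repA, dif_pos hn]
      simp
    · rw [nToPGo, if_neg hn, repA, dif_neg hn]
      rfl

theorem fAltGo_eq_valB (fuel : Nat) : ∀ (n mult res : Int), n.toNat ≤ fuel →
    fAltGo fuel n mult res = res + mult * valB n := by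
  induction fuel with
  | zero =>
    intro n mult res h
    have hn : ¬ 0 < n := by omega
    rw [valB, dif_neg hn]
    show res = res + mult * 0
    ring
  | succ k ih =>
    intro n mult res h
    by_cases hn : 0 < n
    · rw [fAltGo, if_pos (by exact hn), ih _ _ _ (by have := floordiv20_toNat_lt n hn; omega)]
      conv_rhs => rw [valB, dif_pos hn]
      ring
    · rw [fAltGo, if_neg hn, valB, dif_neg hn]
      ring

theorem int20Go_append (c : Char) : ∀ (xs : List Char) (acc : Int),
    int20Go (xs ++ [c]) acc =
      (int20Go xs acc).bind (fun v =>
        match PySem.Int.digitVal? c with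
        | some d => if d < 20 then some (v * 20 + (d : Int)) else none
        | none => none) := by
  intro xs
  induction xs with
  | nil =>
    intro acc
    simp [int20Go]
  | cons a t ih =>
    intro acc
    rw [List.cons_append, int20Go, int20Go]
    cases hd : PySem.Int.digitVal? a with
    | none => rfl
    | some d =>
      dsimp only
      by_cases h20 : d < 20
      · rw [if_pos h20, if_pos h20, ih]
      · rw [if_neg h20, if_neg h20]
        rfl

theorem digit_step (d v : Int) (h0 : 0 ≤ d) (h1 : d < 20) :
    (match PySem.Int.digitVal? (transChar ((PySem.List.pyGet? alfChars d).getD ' ')) with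
      | some e => if e < 20 then some (v * 20 + (e : Int)) else none
      | none => none) = some (v * 20 + (if d < 19 then d + 1 else 19)) := by
  have h : PySem.Int.digitVal? (transChar ((PySem.List.pyGet? alfChars d).getD ' ')) =
      some ((if d < 19 then d + 1 else 19)).toNat := by
    interval_cases d <;> decide
  have h2 : ((if d < 19 then d + 1 else 19) : Int).toNat < 20 := by
    split <;> omega
  have h3 : (((if d < 19 then d + 1 else 19) : Int).toNat : Int) = (if d < 19 then d + 1 else 19) := by
    split <;> omega
  rw [h]
  dsimp only
  rw [if_pos h2, h3]

theorem int20Go_repA (n : Int) (h : 0 ≤ n) :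
    int20Go ((repA n).map transChar) 0 = some (valB n) := by
  generalize hk : n.toNat = k
  induction k using Nat.strong_induction_on generalizing n with
  | _ k ih =>
    by_cases hn : 0 < n
    · have hdiv0 : 0 ≤ PySem.Int.floordiv n 20 := by
        rw [PySem.Int.floordiv_eq_ediv_of_pos (by norm_num)]
        omega
      have hlt : (PySem.Int.floordiv n 20).toNat < k := by
        have := floordiv20_toNat_lt n hn
        omega
      conv_lhs => rw [repA, dif_pos hn]
      rw [List.map_append, List.map_singleton, int20Go_append,
        ih (PySem.Int.floordiv n 20).toNat hlt (PySem.Int.floordiv n 20) hdiv0 rfl,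
        Option.bind_some]
      rw [digit_step (PySem.Int.mod n 20) (valB (PySem.Int.floordiv n 20))
        (PySem.Int.mod_nonneg n (by norm_num)) (PySem.Int.mod_lt n (by norm_num))]
      conv_rhs => rw [valB, dif_pos hn]
      congr 1
      ring
    · rw [repA, dif_neg hn, valB, dif_neg hn]
      rfl

theorem repA_ne_nil (n : Int) (h : 0 < n) : (repA n).map transChar ≠ [] := by
  rw [repA, dif_pos h]
  simp

-- ===== VERDICT (by name: the statement is the Claim_ definition above) =====
theorem f_spec : Claim_equal_f := by
  intro n _ hpre
  unfold Pre_f at hpre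
  show (int20? ((nToP n 20).foldl (fun acc el => acc ++ [transChar el]) [])).getD 0 = f_alt n
  rw [show nToP n 20 = repA n from by
        rw [nToP, nToPGo_eq_repA (n.toNat + 1) n [] (by omega)]; simp,
      PySem.List.foldl_append_singleton_eq_map]
  show (int20? ((repA n).map transChar)).getD 0 = fAltGo (n.toNat + 1) n 1 0
  rw [fAltGo_eq_valB (n.toNat + 1) n 1 0 (by omega),
      int20?, if_neg (repA_ne_nil n (by omega)), int20Go_repA n (by omega)]
  simp

def f_raises : Claim_raises_f := by
  unfold Claim_raises_f
  exact ⟨fun n _ hr => by unfold Raises_f at hr; unfold Pre_f; omega, by decide⟩
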